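-- pv_equiv track=rewrite | github.com/arthexis/arthexis | apps/sigils/sigil_resolver.py | _parse_root_name
-- ===== SOURCE A (Python) =====
-- class TokenParseError(ValueError):
--     """Raised when a sigil token cannot be parsed into resolver parts."""
--
-- def _parse_root_name(token: str, index: int) -> tuple[str, int]:
--     """Parse the sigil root name from the current token offset.
--
--     Args:
--         token: Raw token text without surrounding brackets.
--         index: Starting offset within ``token``.
--
--     Returns:
--         A tuple containing the parsed root name and the next unread offset.
--
--     Raises:
--         TokenParseError: If the token does not start with a root name.
--     """
--     start = index
--     while index < len(token):
--         if token[index] in ":=." or token[index : index + 2] == "->":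
--             break
--         index += 1
--     root_name = token[start:index]
--     if not root_name:
--         raise TokenParseError("Sigil token is missing a root name")
--     return root_name, index
-- ===== SOURCE B (Python) =====
-- class TokenParseError(ValueError):
--     """Raised when a sigil token cannot be parsed into resolver parts."""
--
-- def _parse_root_name(token: str, index: int) -> tuple[str, int]:
--     """Parse the sigil root name by locating the nearest delimiter with str.find."""
--     cuts = [p for p in (token.find(":", index),
--                         token.find("=", index),
--                         token.find(".", index),
--                         token.find("->", index)) if p != -1]
--     end = min(cuts, default=len(token))
--     root_name = token[index:end]
--     if not root_name:
--         raise TokenParseError("Sigil token is missing a root name")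
--     return root_name, end
-- ===== Notes on version B (the rewrite author's own statement) =====
-- stated objective: simpler
-- what changed: Replaces A's char-by-char early-breaking scan with one str.find per delimiter combined by min (default len) and a single slice; the explicit Python index loop disappears, and the scan runs inside C-level str.find.
-- outside the precondition, e.g. on _parse_root_name('ab.d', -4): A returns ('ab', -2), B returns ('ab', 2)
import Mathlib
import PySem

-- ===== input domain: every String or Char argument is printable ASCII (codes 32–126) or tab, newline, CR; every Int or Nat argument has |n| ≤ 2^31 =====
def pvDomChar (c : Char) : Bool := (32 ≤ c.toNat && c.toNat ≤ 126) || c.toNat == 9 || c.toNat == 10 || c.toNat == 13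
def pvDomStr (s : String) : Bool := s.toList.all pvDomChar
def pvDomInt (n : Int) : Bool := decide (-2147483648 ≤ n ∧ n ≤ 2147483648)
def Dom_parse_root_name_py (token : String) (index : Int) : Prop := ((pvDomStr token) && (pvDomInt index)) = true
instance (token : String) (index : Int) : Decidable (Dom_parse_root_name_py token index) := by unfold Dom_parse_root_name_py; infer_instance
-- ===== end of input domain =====

-- B replaces A's char-by-char early-breaking scan with one str.find per delimiter combined
-- by min (simpler, and measurably faster in CPython since the scan moves into C-level
-- str.find); equivalence proved on non-negative in-range offsets.


-- ===== PORT A =====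
-- A's while-loop: advance index while no delimiter ':','=','.' or two-char "->" starts there.
def pvLoopA (cs : List Char) (n : Int) : Nat → Int → Int
  | 0, i => i
  | fuel+1, i =>
    if i < n then
      match PySem.List.pyGet? cs i with
      | some c =>
        if c = ':' ∨ c = '=' ∨ c = '.' ∨ PySem.List.slice cs (some i) (some (i+2)) = ['-', '>']
        then i
        else pvLoopA cs n fuel (i+1)
      | none => i   -- token[index] raises IndexError in Python here; outside Pre_
    else i

def parse_root_name_py (token : String) (index : Int) : String × Int :=
  let cs := token.toList
  let n : Int := PySem.Str.len token
  let stop := pvLoopA cs n (n - index).toNat index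
  let root := PySem.List.slice cs (some index) (some stop)
  -- Python raises TokenParseError when root is empty; those inputs are outside Pre_
  (String.ofList root, stop)

-- ===== PORT B =====
def parse_root_name_py_alt (token : String) (index : Int) : String × Int :=
  let n : Int := PySem.Str.len token
  let cuts := [PySem.Str.findFrom token ":" index,
               PySem.Str.findFrom token "=" index,
               PySem.Str.findFrom token "." index,
               PySem.Str.findFrom token "->" index].filter (fun p => p ≠ -1)
  let e := PySem.List.minD cuts (fun p => p) n
  let root := PySem.List.slice token.toList (some index) (some e)
  -- Python raises TokenParseError when root is empty; those inputs are outside Pre_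
  (String.ofList root, e)

-- ===== PRECONDITION & SPEC =====
-- True iff one of the delimiters ':', '=', '.', "->" starts at position i of cs.
def pvBrkAt (cs : List Char) (i : Nat) : Bool :=
  [':'].isPrefixOf (cs.drop i) || ['='].isPrefixOf (cs.drop i) ||
  ['.'].isPrefixOf (cs.drop i) || ['-', '>'].isPrefixOf (cs.drop i)

-- Pre_ restricts to the documented domain (offsets 0 ≤ index into token; A's behaviour on
-- -len(token) ≤ index < 0 relies on Python's negative-index/slice wraparound and is accidental,
-- so it is excluded) and excludes the empty-root inputs on which A raises TokenParseError.
def Pre_parse_root_name_py (token : String) (index : Int) : Prop :=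
  0 ≤ index ∧ index.toNat < token.toList.length ∧ pvBrkAt token.toList index.toNat = false
instance (token : String) (index : Int) : Decidable (Pre_parse_root_name_py token index) := by
  unfold Pre_parse_root_name_py; infer_instance

def pvWitness_parse_root_name_py : String × Int := ("env.HOME", 0)

def Spec_parse_root_name_py (token : String) (index : Int) (out : String × Int) : Prop :=
  out = parse_root_name_py_alt token index
instance (token : String) (index : Int) (out : String × Int) : Decidable (Spec_parse_root_name_py token index out) := by
  unfold Spec_parse_root_name_py; infer_instance

-- ===== CLAIM (what is proved, stated in full; the proofs are below) =====
def Claim_equal_parse_root_name_py : Prop := ∀ (token : String) (index : Int), Dom_parse_root_name_py token index → Pre_parse_root_name_py token index → Spec_parse_root_name_py token index (parse_root_name_py token index)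

-- ===== LEMMAS AND PROOFS =====

-- First delimiter position at or after i (cs.length if none): the common characterisation
-- both the A-loop and B's min-of-finds are reduced to.
def pvFb (cs : List Char) (i : Nat) : Nat :=
  if i < cs.length then
    (if pvBrkAt cs i then i else pvFb cs (i+1))
  else cs.length
termination_by cs.length - i

theorem pvFb_spec (cs : List Char) (i : Nat) (hle : i ≤ cs.length) :
    i ≤ pvFb cs i ∧ pvFb cs i ≤ cs.length ∧
    (∀ k, i ≤ k → k < pvFb cs i → pvBrkAt cs k = false) ∧
    (pvFb cs i < cs.length → pvBrkAt cs (pvFb cs i) = true) := by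
  revert hle
  induction i using pvFb.induct cs with
  | case1 i hlt hb =>
    intro hle
    rw [pvFb, if_pos hlt, if_pos hb]
    exact ⟨le_refl _, le_of_lt hlt, fun k hk hk' => absurd hk (by omega), fun _ => hb⟩
  | case2 i hlt hb ih =>
    intro hle
    have ih := ih (by omega)
    rw [pvFb, if_pos hlt, if_neg (by simp [hb])]
    obtain ⟨h1, h2, h3, h4⟩ := ih
    refine ⟨by omega, h2, fun k hk hk' => ?_, h4⟩
    rcases Nat.eq_or_lt_of_le hk with rfl | h
    · simpa using hb
    · exact h3 k h hk'
  | case3 i hlt =>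
    intro hle
    have : i = cs.length := by omega
    subst this
    rw [pvFb, if_neg hlt]
    exact ⟨by omega, le_refl _, fun k hk hk' => absurd hk' (by omega), fun h => absurd h (by omega)⟩

theorem pvCond_iff (cs : List Char) (i : Nat) (c : Char) (hc : cs[i]? = some c) :
    (c = ':' ∨ c = '=' ∨ c = '.' ∨ PySem.List.slice cs (some (i : Int)) (some ((i : Int)+2)) = ['-','>'])
      ↔ pvBrkAt cs i = true := by
  have hi : i < cs.length := by
    by_contra h
    simp [List.getElem?_eq_none (by omega : cs.length ≤ i)] at hc
  have hdrop : cs.drop i = c :: cs.drop (i+1) := by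
    rw [List.drop_eq_getElem_cons hi]
    simp only [List.getElem?_eq_some_iff] at hc
    obtain ⟨h, rfl⟩ := hc
    rfl
  have hslice : PySem.List.slice cs (some (i : Int)) (some ((i : Int)+2)) = (cs.drop i).take 2 := by
    have : ((i : Int) + 2) = ((i : Int) + ((2:Nat) : Int)) := by norm_num
    rw [this, PySem.List.slice_natCast_add]
  rw [hslice, hdrop]
  unfold pvBrkAt
  rw [hdrop]
  cases h1 : cs.drop (i+1) with
  | nil => simp [List.isPrefixOf]; tauto
  | cons d t => simp [List.isPrefixOf]; tauto

theorem pvLoopA_eq_fb (cs : List Char) (fuel i : Nat) (h : cs.length ≤ fuel + i) (hle : i ≤ cs.length) :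
    pvLoopA cs (cs.length : Int) fuel (i : Int) = (pvFb cs i : Int) := by
  induction fuel generalizing i with
  | zero =>
    have : i = cs.length := by omega
    subst this
    rw [pvLoopA, pvFb, if_neg (by omega)]
  | succ fuel ih =>
    rw [pvLoopA]
    by_cases hlt : i < cs.length
    · rw [if_pos (by exact_mod_cast hlt)]
      have hget : PySem.List.pyGet? cs (i : Int) = cs[i]? := by
        simp [pysem]
      obtain ⟨c, hc⟩ : ∃ c, cs[i]? = some c := ⟨cs[i], by simp [hlt]⟩
      rw [hget, hc]
      simp only []
      by_cases hcond : (c = ':' ∨ c = '=' ∨ c = '.' ∨ PySem.List.slice cs (some (i : Int)) (some ((i : Int)+2)) = ['-','>'])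
      · rw [if_pos hcond, pvFb, if_pos hlt, if_pos ((pvCond_iff cs i c hc).mp hcond)]
      · rw [if_neg hcond, pvFb, if_pos hlt,
          if_neg (by simp [← pvCond_iff cs i c hc, hcond])]
        have := ih (i+1) (by omega) (by omega)
        rw [← this]
        norm_num
    · rw [if_neg (by exact_mod_cast hlt), pvFb, if_neg hlt]
      have : i = cs.length := by omega
      omega

theorem pvBrk_iff (cs : List Char) (i : Nat) :
    pvBrkAt cs i = true ↔
      ([':'] <+: cs.drop i ∨ ['='] <+: cs.drop i ∨ ['.'] <+: cs.drop i ∨ ['-','>'] <+: cs.drop i) := by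
  simp [pvBrkAt, List.isPrefixOf_iff_prefix, or_assoc]

-- any of the four delimiter strings having a prefix occurrence at position k is a break there
theorem pvSub_brk (cs : List Char) (sub : List Char)
    (hsub : sub ∈ [[':'], ['='], ['.'], ['-','>']]) (k : Nat) (hp : sub <+: cs.drop k) :
    pvBrkAt cs k = true := by
  rw [pvBrk_iff]
  simp only [List.mem_cons] at hsub
  rcases hsub with rfl | rfl | rfl | rfl | h
  · exact Or.inl hp
  · exact Or.inr (Or.inl hp)
  · exact Or.inr (Or.inr (Or.inl hp))
  · exact Or.inr (Or.inr (Or.inr hp))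
  · simp at h

theorem pvNoOcc (cs : List Char) (sub : List Char) (hne : sub ≠ [])
    (hsub : sub ∈ [[':'], ['='], ['.'], ['-','>']]) (i : Nat) (hi : i ≤ cs.length)
    (hfree : ∀ k, i ≤ k → k < cs.length → pvBrkAt cs k = false) :
    PySem.Chars.findFrom cs sub (i : Int) = -1 := by
  rw [PySem.Chars.findFrom_natCast_eq_neg_one_iff cs sub i hi]
  intro hinf
  rw [← PySem.Chars.isIn_iff_infix, ← PySem.Chars.exists_prefix_drop_iff_isIn] at hinf
  obtain ⟨t, ht⟩ := hinf
  rw [List.drop_drop] at ht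
  by_cases hlt : i + t < cs.length
  · have := pvSub_brk cs sub hsub (i+t) ht
    rw [hfree (i+t) (by omega) hlt] at this
    exact Bool.false_ne_true this
  · rw [List.drop_eq_nil_of_le (by omega)] at ht
    exact hne (List.prefix_nil.mp ht)

theorem pvB_end_eq_fb (cs : List Char) (i : Nat) (h : i ≤ cs.length) :
    PySem.List.minD
      (([PySem.Chars.findFrom cs [':'] (i : Int),
         PySem.Chars.findFrom cs ['='] (i : Int),
         PySem.Chars.findFrom cs ['.'] (i : Int),
         PySem.Chars.findFrom cs ['-', '>'] (i : Int)].filter (fun p => p ≠ -1)))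
      (fun p => p) (cs.length : Int) = (pvFb cs i : Int) := by
  obtain ⟨hge, hle, hfree, hhit⟩ := pvFb_spec cs i h
  set j := pvFb cs i with hj
  set subs : List (List Char) := [[':'], ['='], ['.'], ['-','>']] with hsubs
  set cuts := ([PySem.Chars.findFrom cs [':'] (i : Int),
         PySem.Chars.findFrom cs ['='] (i : Int),
         PySem.Chars.findFrom cs ['.'] (i : Int),
         PySem.Chars.findFrom cs ['-', '>'] (i : Int)].filter (fun p => p ≠ -1)) with hcuts
  have hmemF : ∀ p ∈ cuts, ∃ sub ∈ subs, PySem.Chars.findFrom cs sub (i : Int) = p ∧ p ≠ -1 := by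
    intro p hp
    rw [hcuts] at hp
    simp only [List.mem_filter, List.mem_cons, decide_eq_true_eq] at hp
    obtain ⟨hmem, hne⟩ := hp
    rcases hmem with rfl | rfl | rfl | rfl | habs
    · exact ⟨[':'], by simp [hsubs], rfl, hne⟩
    · exact ⟨['='], by simp [hsubs], rfl, hne⟩
    · exact ⟨['.'], by simp [hsubs], rfl, hne⟩
    · exact ⟨['-','>'], by simp [hsubs], rfl, hne⟩
    · simp at habs
  have hlow : ∀ p ∈ cuts, (j : Int) ≤ p := by
    intro p hp
    obtain ⟨sub, hsub, hF, hne⟩ := hmemF p hp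
    obtain ⟨hip, hpre, hmin⟩ := PySem.Chars.findFrom_natCast_spec cs sub i h (hF ▸ hne)
    rw [hF] at hip hpre
    have hbrk := pvSub_brk cs sub hsub p.toNat hpre
    have hjle : j ≤ p.toNat := by
      by_contra hc
      rw [hfree p.toNat (by omega) (by omega)] at hbrk
      exact Bool.false_ne_true hbrk
    omega
  by_cases hcase : j < cs.length
  · -- some delimiter starts at j; its find equals j and is the minimum of cuts
    have hbrk := hhit hcase
    rw [pvBrk_iff] at hbrk
    obtain ⟨sub, hsub, hpre⟩ : ∃ sub ∈ subs, sub <+: cs.drop j := by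
      rcases hbrk with h1 | h1 | h1 | h1
      · exact ⟨[':'], by simp [hsubs], h1⟩
      · exact ⟨['='], by simp [hsubs], h1⟩
      · exact ⟨['.'], by simp [hsubs], h1⟩
      · exact ⟨['-','>'], by simp [hsubs], h1⟩
    set F := PySem.Chars.findFrom cs sub (i : Int) with hF
    have hFne : F ≠ -1 := by
      rw [hF, ne_eq, PySem.Chars.findFrom_natCast_eq_neg_one_iff cs sub i h]
      simp only [not_not]
      rw [← PySem.Chars.isIn_iff_infix, ← PySem.Chars.exists_prefix_drop_iff_isIn]
      refine ⟨j - i, ?_⟩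
      rw [List.drop_drop]
      have hx : i + (j - i) = j := by omega
      rw [hx]; exact hpre
    obtain ⟨hiF, hpreF, hminF⟩ := PySem.Chars.findFrom_natCast_spec cs sub i h (hF ▸ hFne)
    rw [← hF] at hiF hpreF hminF
    have hFmem : F ∈ cuts := by
      rw [hcuts]
      simp only [List.mem_filter, decide_eq_true_eq]
      constructor
      · rw [hsubs] at hsub
        simp only [List.mem_cons] at hsub
        rcases hsub with rfl | rfl | rfl | rfl | habs
        · simp [hF]
        · simp [hF]
        · simp [hF]
        · simp [hF]
        · simp at habs
      · exact hFne
    have hFlej : F.toNat ≤ j := by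
      by_contra hc
      exact hminF j hge (by omega) hpre
    have hFj : F = (j : Int) := le_antisymm (by omega) (hlow F hFmem)
    rcases hmq : PySem.List.min? cuts (fun p => p) with _ | m
    · rw [PySem.List.min?_eq_none_iff] at hmq
      rw [hmq] at hFmem
      simp at hFmem
    · have hm1 : (j : Int) ≤ m := hlow m (PySem.List.min?_mem hmq)
      have hm2 : m ≤ (j : Int) := by
        have := PySem.List.min?_isMin hmq F hFmem
        omega
      simp [PySem.List.minD, hmq]
      omega
  · -- no delimiter at or after i: every find is -1 and cuts is empty
    have hjlen : j = cs.length := by omega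
    have hnone : cuts = [] := by
      rw [hcuts]
      rw [List.filter_eq_nil_iff]
      intro p hp
      simp only [List.mem_cons] at hp
      have hfree' : ∀ k, i ≤ k → k < cs.length → pvBrkAt cs k = false := by
        intro k hk hk'; exact hfree k hk (by omega)
      rcases hp with rfl | rfl | rfl | rfl | habs
      · simp [pvNoOcc cs [':'] (by simp) (by simp) i h hfree']
      · simp [pvNoOcc cs ['='] (by simp) (by simp) i h hfree']
      · simp [pvNoOcc cs ['.'] (by simp) (by simp) i h hfree']
      · simp [pvNoOcc cs ['-','>'] (by simp) (by simp) i h hfree']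
      · simp at habs
    rw [hnone, hjlen]
    simp [PySem.List.minD, PySem.List.min?]

theorem pvMain (token : String) (index : Int)
    (hpre : Pre_parse_root_name_py token index) :
    parse_root_name_py token index = parse_root_name_py_alt token index := by
  obtain ⟨hnn, hlt, hbrk⟩ := hpre
  unfold parse_root_name_py parse_root_name_py_alt
  have hidx : index = ((index.toNat : Nat) : Int) := (Int.toNat_of_nonneg hnn).symm
  set cs := token.toList with hcs
  set i := index.toNat with hi
  have hilen : i ≤ cs.length := le_of_lt hlt
  have hlen : PySem.Str.len token = ((cs.length : Nat) : Int) := by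
    simp [pysem, hcs]
  have hfuel : ((cs.length : Int) - ((i : Nat) : Int)).toNat = cs.length - i := by omega
  have hstop : pvLoopA cs ((cs.length : Int)) ((cs.length : Int) - ((i : Nat) : Int)).toNat ((i : Nat) : Int)
      = (pvFb cs i : Int) := by
    rw [hfuel]
    exact pvLoopA_eq_fb cs (cs.length - i) i (by omega) hilen
  have hf1 : PySem.Str.findFrom token ":" index = PySem.Chars.findFrom cs [':'] ((i:Nat) : Int) := by
    rw [PySem.Str.findFrom_eq, ← hidx]; rfl
  have hf2 : PySem.Str.findFrom token "=" index = PySem.Chars.findFrom cs ['='] ((i:Nat) : Int) := by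
    rw [PySem.Str.findFrom_eq, ← hidx]; rfl
  have hf3 : PySem.Str.findFrom token "." index = PySem.Chars.findFrom cs ['.'] ((i:Nat) : Int) := by
    rw [PySem.Str.findFrom_eq, ← hidx]; rfl
  have hf4 : PySem.Str.findFrom token "->" index = PySem.Chars.findFrom cs ['-','>'] ((i:Nat) : Int) := by
    rw [PySem.Str.findFrom_eq, ← hidx]; rfl
  simp only [hf1, hf2, hf3, hf4]
  rw [hidx, hlen, hstop, pvB_end_eq_fb cs i hilen]

-- ===== VERDICT (by name: the statement is the Claim_ definition above) =====
theorem parse_root_name_py_spec : Claim_equal_parse_root_name_py := by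
  intro token index _ hpre
  exact pvMain token index hpre
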